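-- pv_equiv track=rewrite | github.com/DivineJK/MyPythonLibrary | Others/BoundingBox.py | getBoundingBoxSub
-- ===== SOURCE A (Python) =====
-- def getBoundingBoxSub(gridMap, charWhite):
--     n, m = len(gridMap), max(len(i) for i in gridMap)
--     cnt = 0
--     cntW = 0
--     for i in range(n):
--         if len(gridMap[i]) < m:
--             gridMap[i] = [charWhite]*(m-len(gridMap[i]))
--         for j in range(m):
--             cnt += 1
--             if gridMap[i][j] == charWhite:
--                 cntW += 1
--     if cnt == cntW:
--         return []
--     xu, xd = -1, n+1
--     yl, yr = -1, m+1
--     flg = True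
--     while flg:
--         xu += 1
--         for i in range(m):
--             if gridMap[xu][i] == charWhite:
--                 continue
--             flg = False
--             break
--     flg = True
--     while flg:
--         xd -= 1
--         for i in range(m):
--             if gridMap[xd-1][i] == charWhite:
--                 continue
--             flg = False
--             break
--     flg = True
--     while flg:
--         yl += 1
--         for i in range(xu, xd):
--             if gridMap[i][yl] == charWhite:
--                 continue
--             flg = False
--             break
--     flg = True
--     while flg:
--         yr -= 1
--         for i in range(xu, xd):
--             if gridMap[i][yr-1] == charWhite:
--                 continue
--             flg = False
--             break
--     res = [[0]*(yr-yl) for i in range(xd-xu)]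
--     for i in range(xu, xd):
--         for j in range(yl, yr):
--             res[i-xu][j-yl] = gridMap[i][j]
--     return res
-- ===== SOURCE B (Python) =====
-- def getBoundingBoxSub(gridMap, charWhite):
--     m = max((len(r) for r in gridMap), default=0)
--     grid = [r + [charWhite] * (m - len(r)) for r in gridMap]
--     rows = [i for i in range(len(grid)) if any(c != charWhite for c in grid[i])]
--     if not rows:
--         return []
--     cols = [j for j in range(m) if any(r[j] != charWhite for r in grid)]
--     minr, maxr = rows[0], rows[-1]
--     minc, maxc = cols[0], cols[-1]
--     return [r[minc:maxc + 1] for r in grid[minr:maxr + 1]]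
-- ===== Notes on version B (the rewrite author's own statement) =====
-- stated objective: simpler
-- what changed: A's four fueled while-loops probing rows/columns from each side plus an index-filled result table are replaced by one padded copy of the grid, min/max non-white row and column indices read off two comprehensions, and two slices; B also does not mutate its argument where A pads rows in place.
import Mathlib
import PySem

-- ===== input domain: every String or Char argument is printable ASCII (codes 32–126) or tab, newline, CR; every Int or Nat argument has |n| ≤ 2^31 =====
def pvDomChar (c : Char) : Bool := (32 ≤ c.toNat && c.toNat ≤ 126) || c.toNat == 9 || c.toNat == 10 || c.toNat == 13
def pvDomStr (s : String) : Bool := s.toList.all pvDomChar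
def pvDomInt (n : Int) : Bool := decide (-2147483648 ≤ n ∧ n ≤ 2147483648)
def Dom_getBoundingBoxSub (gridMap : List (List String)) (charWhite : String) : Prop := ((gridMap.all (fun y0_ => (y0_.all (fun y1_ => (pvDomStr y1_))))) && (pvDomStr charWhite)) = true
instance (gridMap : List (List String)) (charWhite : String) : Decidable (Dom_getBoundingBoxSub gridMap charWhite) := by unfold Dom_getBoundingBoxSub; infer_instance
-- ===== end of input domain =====

-- B replaces A's four directional while-loop scans and index-filled copy by one min/max pass and two
-- slices (objective: simpler).  A also pads short rows of gridMap IN PLACE; B does not mutate its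
-- argument — the equivalence proved here is about the return value only.

-- ===== PORT A =====
-- gridMap[i][j] (none = IndexError)
def pvCell (g : List (List String)) (i j : Int) : Option String :=
  (PySem.List.pyGet? g i).bind (fun r => PySem.List.pyGet? r j)

-- 'for i in range(m): if gridMap[x][i] == charWhite: continue / flg = False; break':
-- flg is left True iff every scanned cell equals charWhite
def pvRowAll (g : List (List String)) (cw : String) (x : Int) (m : Nat) : Bool :=
  (List.range m).all (fun j => pvCell g x (j : Int) == some cw)

-- the same scan over 'for i in range(xu, xd)' at column y
def pvColAll (g : List (List String)) (cw : String) (xu xd y : Int) : Bool :=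
  (PySem.List.pyRange xu xd 1).all (fun i => pvCell g i y == some cw)

-- 'while flg: x += 1; scan at x' — fueled forward search (the fuel is ample on inputs satisfying Pre_)
def pvFindFwd (P : Int → Bool) : Nat → Int → Int
  | 0, x => x
  | f+1, x => if P (x+1) then pvFindFwd P f (x+1) else x+1

-- 'while flg: x -= 1; scan at x-1'
def pvFindBwd (P : Int → Bool) : Nat → Int → Int
  | 0, x => x
  | f+1, x => if P (x-2) then pvFindBwd P f (x-1) else x-1

def getBoundingBoxSub (gridMap : List (List String)) (charWhite : String) : List (List String) :=
  let n := gridMap.length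
  let m := (PySem.List.max? (gridMap.map (fun r => r.length)) (fun x => x)).getD 0
  -- first loop: the in-place 'gridMap[i] = [charWhite]*(m-len(gridMap[i]))' on short rows …
  let g := gridMap.map (fun r => if r.length < m then List.replicate (m - r.length) charWhite else r)
  -- … and the cnt/cntW counting over the rows as just mutated
  let cnts := g.foldl (fun (p : Nat × Nat) r =>
      (List.range m).foldl (fun (q : Nat × Nat) j =>
        (q.1 + 1, if r.getD j "" == charWhite then q.2 + 1 else q.2)) p) (0, 0)
  if cnts.1 = cnts.2 then []
  else
    let xu := pvFindFwd (fun x => pvRowAll g charWhite x m) (n+2) (-1)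
    let xd := pvFindBwd (fun x => pvRowAll g charWhite x m) (n+2) ((n : Int)+1)
    let yl := pvFindFwd (fun y => pvColAll g charWhite xu xd y) (m+2) (-1)
    let yr := pvFindBwd (fun y => pvColAll g charWhite xu xd y) (m+2) ((m : Int)+1)
    (PySem.List.pyRange xu xd 1).map (fun i =>
      (PySem.List.pyRange yl yr 1).map (fun j => (pvCell g i j).getD ""))

-- ===== PORT B =====
def getBoundingBoxSub_alt (gridMap : List (List String)) (charWhite : String) : List (List String) :=
  let m := PySem.List.maxD (gridMap.map (fun r => r.length)) (fun x => x) 0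
  let grid := gridMap.map (fun r => r ++ List.replicate (m - r.length) charWhite)
  let rows := (List.range grid.length).filter (fun i => (grid.getD i []).any (fun c => c != charWhite))
  match rows with
  | [] => []
  | minr :: _ =>
    let maxr := PySem.List.pyGetD rows (-1) 0
    let cols := (List.range m).filter (fun j => grid.any (fun r => r.getD j "" != charWhite))
    let minc := PySem.List.pyGetD cols 0 0
    let maxc := PySem.List.pyGetD cols (-1) 0
    (PySem.List.slice grid (some (minr : Int)) (some ((maxr : Int) + 1))).map
      (fun r => PySem.List.slice r (some (minc : Int)) (some ((maxc : Int) + 1)))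

-- ===== PRECONDITION & SPEC =====
-- Pre_ excludes exactly the inputs on which A raises: the empty grid (ValueError from max()) and
-- grids with a non-empty row shorter than the longest row (A's in-place padding replaces such a row
-- by the pad alone, so the scan of that row raises IndexError).
def Pre_getBoundingBoxSub (gridMap : List (List String)) (charWhite : String) : Prop :=
  gridMap ≠ [] ∧ ∀ r ∈ gridMap,
    r.length = 0 ∨ r.length = PySem.List.maxD (gridMap.map (fun r => r.length)) (fun x => x) 0
instance (gridMap : List (List String)) (charWhite : String) : Decidable (Pre_getBoundingBoxSub gridMap charWhite) := by unfold Pre_getBoundingBoxSub; infer_instance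
def pvWitness_getBoundingBoxSub : List (List String) × String := ([["a"]], ".")

def Spec_getBoundingBoxSub (gridMap : List (List String)) (charWhite : String) (out : List (List String)) : Prop := out = getBoundingBoxSub_alt gridMap charWhite
instance (gridMap : List (List String)) (charWhite : String) (out : List (List String)) : Decidable (Spec_getBoundingBoxSub gridMap charWhite out) := by unfold Spec_getBoundingBoxSub; infer_instance

-- ===== CLAIM (what is proved, stated in full; the proofs are below) =====
def Claim_equal_getBoundingBoxSub : Prop := ∀ (gridMap : List (List String)) (charWhite : String), Dom_getBoundingBoxSub gridMap charWhite → Pre_getBoundingBoxSub gridMap charWhite → Spec_getBoundingBoxSub gridMap charWhite (getBoundingBoxSub gridMap charWhite)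

-- ===== LEMMAS AND PROOFS =====

-- the forward while-loop stops at the first index failing P
lemma pvFindFwd_eq (P : Int → Bool) (l : Int) (hstop : P l = false) :
    ∀ (f : Nat) (x : Int), x < l → l ≤ x + f →
      (∀ i : Int, x < i → i < l → P i = true) → pvFindFwd P f x = l := by
  intro f
  induction f with
  | zero => intro x h1 h2 _; omega
  | succ f ih =>
    intro x h1 h2 hbtw
    by_cases hx : x + 1 = l
    · simp only [pvFindFwd, hx, hstop]
      simp
    · have hlt : x + 1 < l := by omega
      have hr : P (x + 1) = true := hbtw _ (by omega) hlt
      simp only [pvFindFwd, hr, if_true]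
      exact ih (x+1) hlt (by omega) (fun i hi1 hi2 => hbtw i (by omega) hi2)

-- the backward while-loop stops at t whose predecessor fails P
lemma pvFindBwd_eq (P : Int → Bool) (t : Int) (hstop : P (t-1) = false) :
    ∀ (f : Nat) (x : Int), t < x → x ≤ t + f →
      (∀ i : Int, t < i → i < x → P (i-1) = true) → pvFindBwd P f x = t := by
  intro f
  induction f with
  | zero => intro x h1 h2 _; omega
  | succ f ih =>
    intro x h1 h2 hbtw
    by_cases hx : x - 1 = t
    · have : x - 2 = t - 1 := by omega
      simp only [pvFindBwd, this, hstop]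
      simp; omega
    · have hlt : t < x - 1 := by omega
      have hr : P (x - 1 - 1) = true := hbtw (x-1) hlt (by omega)
      have : x - 2 = x - 1 - 1 := by omega
      simp only [pvFindBwd, this, hr, if_true]
      exact ih (x-1) hlt (by omega) (fun i hi1 hi2 => hbtw i hi1 (by omega))

-- the cnt/cntW inner loop counts the scanned cells and the white ones among them
lemma pv_foldl_count {X : Type} (pred : X → Bool) :
    ∀ (L : List X) (a b : Nat),
      L.foldl (fun (q : Nat × Nat) x => (q.1 + 1, if pred x then q.2 + 1 else q.2)) (a, b)
        = (a + L.length, b + L.countP pred) := by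
  intro L
  induction L with
  | nil => intro a b; simp
  | cons x L ih =>
    intro a b
    simp only [List.foldl_cons, List.countP_cons, List.length_cons]
    by_cases hx : pred x = true
    · rw [if_pos hx, ih]; rw [hx]
      simp only [Prod.mk.injEq]
      exact ⟨by omega, by simp; omega⟩
    · rw [if_neg hx, ih]; rw [Bool.eq_false_iff.mpr hx]
      simp only [Prod.mk.injEq]
      exact ⟨by omega, by simp⟩

-- the whole first loop
lemma pv_foldl_counts (cw : String) (M : Nat) :
    ∀ (G : List (List String)) (a b : Nat),
      G.foldl (fun (p : Nat × Nat) r =>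
          (List.range M).foldl (fun (q : Nat × Nat) j =>
            (q.1 + 1, if r.getD j "" == cw then q.2 + 1 else q.2)) p) (a, b)
        = (a + G.length * M,
           b + (G.map (fun r => (List.range M).countP (fun j => r.getD j "" == cw))).sum) := by
  intro G
  induction G with
  | nil => intro a b; simp
  | cons r G ih =>
    intro a b
    simp only [List.foldl_cons, List.map_cons, List.sum_cons, List.length_cons]
    rw [pv_foldl_count, ih]
    simp only [Prod.mk.injEq, List.length_range]
    exact ⟨by ring, by omega⟩

lemma pv_sum_eq_mul_iff (M : Nat) :
    ∀ (L : List Nat), (∀ x ∈ L, x ≤ M) → (L.sum = L.length * M ↔ ∀ x ∈ L, x = M) := by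
  intro L
  induction L with
  | nil => simp
  | cons x L ih =>
    intro hle
    have hsumle : L.sum ≤ L.length * M := by
      have := List.sum_le_card_nsmul L M (fun y hy => hle y (List.mem_cons_of_mem _ hy))
      simpa [smul_eq_mul] using this
    have hx : x ≤ M := hle x (List.mem_cons_self)
    have ihs := ih (fun y hy => hle y (List.mem_cons_of_mem _ hy))
    simp only [List.sum_cons, List.length_cons, List.forall_mem_cons]
    have hmul : (L.length + 1) * M = L.length * M + M := by ring
    rw [hmul]
    constructor
    · intro h
      have h1 : x = M ∧ L.sum = L.length * M := by omega
      exact ⟨h1.1, ihs.mp h1.2⟩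
    · intro ⟨h1, h2⟩
      have h3 := ihs.mpr h2
      omega

lemma pv_head_filter_range (p : Nat → Bool) :
    ∀ (n l : Nat), l < n → p l = true → (∀ k, k < l → p k = false) →
      ((List.range n).filter p).head? = some l := by
  intro n
  induction n with
  | zero => intro l h; omega
  | succ n ih =>
    intro l h1 h2 h3
    rw [List.head?_filter] at *
    rw [List.range_succ, List.find?_append]
    by_cases hl : l < n
    · rw [ih l hl h2 h3]; rfl
    · have hln : l = n := by omega
      subst hln
      have hnone : (List.range l).find? p = none := by
        rw [List.find?_eq_none]
        intro x hx
        simp only [List.mem_range] at hx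
        simp [h3 x hx]
      rw [hnone]
      simp [h2]

lemma pv_getLast_filter_range (p : Nat → Bool) :
    ∀ (n g : Nat), g < n → p g = true → (∀ k, g < k → k < n → p k = false) →
      ((List.range n).filter p).getLast? = some g := by
  intro n
  induction n with
  | zero => intro g h; omega
  | succ n ih =>
    intro g h1 h2 h3
    rw [List.range_succ, List.filter_append, List.getLast?_append]
    by_cases hg : g = n
    · subst hg; simp [h2]
    · have hgn : g < n := by omega
      have hpn : p n = false := h3 n (by omega) (by omega)
      rw [ih g hgn h2 (fun k hk1 hk2 => h3 k hk1 (by omega))]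
      simp [hpn]

-- range(a, a+k) of Python ints is the Nat range' cast in
lemma pv_pyRange_natCast : ∀ (k a : Nat),
    PySem.List.pyRange (a : Int) ((a : Int) + (k : Int)) 1 = (List.range' a k).map Int.ofNat := by
  intro k
  induction k with
  | zero => intro a; simp [PySem.List.pyRange_one_eq_nil]
  | succ k ih =>
    intro a
    have h1 : (a : Int) + 1 = ((a + 1 : Nat) : Int) := by push_cast; ring
    have h2 : (a : Int) + ((k + 1 : Nat) : Int) = ((a+1 : Nat) : Int) + (k : Int) := by push_cast; ring
    rw [PySem.List.pyRange_one_cons (by omega), List.range'_succ, List.map_cons, h2, h1, ih (a+1)]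
    rfl

-- a slice of an in-range window is the elementwise map over its indices
lemma pv_drop_take_eq_map_range' {α : Type} (d : α) :
    ∀ (k a : Nat) (l : List α), a + k ≤ l.length →
      (l.drop a).take k = (List.range' a k).map (fun i => l.getD i d) := by
  intro k
  induction k with
  | zero => intro a l h; simp
  | succ k ih =>
    intro a l h
    rw [List.range'_succ, List.map_cons]
    have ha : a < l.length := by omega
    rw [← List.getElem_cons_drop ha, List.take_succ_cons]
    rw [List.getD_eq_getElem l d ha]
    congr 1
    exact ih (a+1) l (by omega)

-- evaluating A's cell accessor in range
lemma pvCell_eval (G : List (List String)) (i j : Nat) (hi : i < G.length) (hj : j < G[i].length) :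
    pvCell G (i : Int) (j : Int) = some (G[i]'hi)[j] := by
  simp [pvCell, PySem.List.pyGet?_natCast, List.getElem?_eq_getElem hi, List.getElem?_eq_getElem hj]

-- the central equivalence
lemma pv_main (gridMap : List (List String)) (cw : String)
    (hpre : Pre_getBoundingBoxSub gridMap cw) :
    getBoundingBoxSub gridMap cw = getBoundingBoxSub_alt gridMap cw := by
  obtain ⟨hne, hlen⟩ := hpre
  simp only [PySem.List.maxD] at hlen
  simp only [getBoundingBoxSub, getBoundingBoxSub_alt, PySem.List.maxD]
  set M := (PySem.List.max? (gridMap.map (fun r => r.length)) (fun x => x)).getD 0 with hM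
  set G := gridMap.map (fun r => r ++ List.replicate (M - r.length) cw) with hG
  -- A's in-place padding produces the same grid as B's padding
  have hpad : gridMap.map (fun r => if r.length < M then List.replicate (M - r.length) cw else r) = G := by
    rw [hG]
    apply List.map_congr_left
    intro r hr
    rcases hlen r hr with h0 | hm
    · have hrnil : r = [] := List.eq_nil_of_length_eq_zero h0
      subst hrnil
      by_cases hM0 : 0 < M
      · simp [hM0]
      · have : M = 0 := by omega
        simp [this]
    · simp [hm]
  have hrowlen : ∀ r ∈ G, r.length = M := by
    intro r hr
    rw [hG] at hr
    obtain ⟨r0, hr0, rfl⟩ := List.mem_map.mp hr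
    rcases hlen r0 hr0 with h0 | hm
    · simp [h0]
    · simp [hm]
  rw [hpad]
  rw [pv_foldl_counts cw M G 0 0]
  simp only [Nat.zero_add]
  set p : Nat → Bool := fun i => (G.getD i []).any (fun c => c != cw) with hp
  set c : List String → Nat := fun r => (List.range M).countP (fun j => r.getD j "" == cw) with hc
  set q : Nat → Bool := fun j => G.any (fun r => r.getD j "" != cw) with hq
  -- per-row: full white count iff the row is all-white
  have hcM : ∀ r ∈ G, (c r = M ↔ ∀ x ∈ r, x = cw) := by
    intro r hr
    have hlr := hrowlen r hr
    rw [hc]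
    simp only []
    have hiff : (List.countP (fun j => r.getD j "" == cw) (List.range M) = M)
        ↔ (∀ j ∈ List.range M, (r.getD j "" == cw) = true) := by
      constructor
      · intro h
        exact List.countP_eq_length.mp (by simpa using h)
      · intro h
        simpa using List.countP_eq_length.mpr h
    rw [hiff]
    simp only [List.mem_range, beq_iff_eq]
    rw [List.forall_mem_iff_getElem]
    constructor
    · intro h i hi
      have := h i (by omega)
      rwa [List.getD_eq_getElem r "" hi] at this
    · intro h j hj
      rw [List.getD_eq_getElem r "" (by omega)]
      exact h j (by omega)
  have hp_iff : ∀ i, (hi : i < G.length) → (p i = false ↔ ∀ x ∈ G[i], x = cw) := by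
    intro i hi
    rw [hp]
    simp only []
    rw [List.getD_eq_getElem G [] hi, List.any_eq_false]
    constructor
    · intro h x hx
      have := h x hx
      simpa [bne_iff_ne] using this
    · intro h x hx
      simp [bne_iff_ne]
      exact h x hx
  have hsum_iff : ((G.map c).sum = G.length * M) ↔ ∀ i, (hi : i < G.length) → p i = false := by
    have hb : ∀ x ∈ G.map c, x ≤ M := by
      rw [List.forall_mem_map]
      intro r _
      rw [hc]
      calc (List.range M).countP _ ≤ (List.range M).length := List.countP_le_length
        _ = M := by simp
    have hmain := pv_sum_eq_mul_iff M (G.map c) hb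
    rw [List.length_map] at hmain
    rw [hmain, List.forall_mem_map]
    constructor
    · intro h i hi
      rw [hp_iff i hi]
      exact (hcM G[i] (List.getElem_mem hi)).mp (h G[i] (List.getElem_mem hi))
    · intro h r hr
      obtain ⟨i, hi, rfl⟩ := List.mem_iff_getElem.mp hr
      exact (hcM _ hr).mpr ((hp_iff i hi).mp (h i hi))
  by_cases hall : (G.map c).sum = G.length * M
  · -- all cells white: both return []
    rw [if_pos (by omega)]
    have hrows_nil : (List.range G.length).filter p = [] := by
      rw [List.filter_eq_nil_iff]
      intro i hi
      rw [List.mem_range] at hi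
      simp [hsum_iff.mp hall i hi]
    rw [hrows_nil]
  · -- a non-white cell exists
    rw [if_neg (by omega)]
    have hex : ∃ i, i < G.length ∧ p i = true := by
      by_contra hcon
      push_neg at hcon
      exact hall (hsum_iff.mpr (fun i hi => Bool.eq_false_iff.mpr (hcon i hi)))
    set lr := Nat.find hex with hlr
    have hlr_spec : lr < G.length ∧ p lr = true := Nat.find_spec hex
    have hlr_min : ∀ k, k < lr → k < G.length → p k = false := by
      intro k hk hkn
      have hnm := Nat.find_min hex hk
      push_neg at hnm
      exact Bool.eq_false_iff.mpr (hnm hkn)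
    set gr := Nat.findGreatest (fun i => i < G.length ∧ p i = true) G.length with hgr
    have hgr_spec : gr < G.length ∧ p gr = true :=
      Nat.findGreatest_spec (P := fun i => i < G.length ∧ p i = true)
        (le_of_lt hlr_spec.1) ⟨hlr_spec.1, hlr_spec.2⟩
    have hgr_max : ∀ k, gr < k → k < G.length → p k = false := by
      intro k hk hkn
      have hng := Nat.findGreatest_is_greatest (P := fun i => i < G.length ∧ p i = true) hk (le_of_lt hkn)
      rw [Bool.eq_false_iff]
      intro hpk
      exact hng ⟨hkn, hpk⟩
    have hband : ∀ k, k < G.length → p k = true → lr ≤ k ∧ k ≤ gr := by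
      intro k hk hpk
      constructor
      · exact Nat.find_le ⟨hk, hpk⟩
      · by_contra hcon
        push_neg at hcon
        rw [hgr_max k hcon hk] at hpk
        exact Bool.false_ne_true hpk
    -- rows
    have hhead : ((List.range G.length).filter p).head? = some lr :=
      pv_head_filter_range p G.length lr hlr_spec.1 hlr_spec.2
        (fun k hk => hlr_min k hk (by omega))
    obtain ⟨tl, htl⟩ := List.head?_eq_some_iff.mp hhead
    have hlast : ((List.range G.length).filter p).getLast? = some gr :=
      pv_getLast_filter_range p G.length gr hgr_spec.1 hgr_spec.2 hgr_max
    rw [htl]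
    have hmaxr : PySem.List.pyGetD (lr :: tl) (-1) 0 = gr := by
      rw [PySem.List.pyGetD_neg_one (lr :: tl) 0 (by simp)]
      rw [htl] at hlast
      rw [List.getLast?_eq_getLast (by simp)] at hlast
      exact Option.some.inj hlast
    -- columns
    have hexc : ∃ j, j < M ∧ q j = true := by
      have hpl := hlr_spec.2
      rw [hp] at hpl
      simp only [] at hpl
      rw [List.getD_eq_getElem G [] hlr_spec.1, List.any_eq_true] at hpl
      obtain ⟨x, hx, hxne⟩ := hpl
      obtain ⟨j, hj, rfl⟩ := List.mem_iff_getElem.mp hx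
      refine ⟨j, by rw [← hrowlen G[lr] (List.getElem_mem hlr_spec.1)]; omega, ?_⟩
      rw [hq]
      simp only []
      rw [List.any_eq_true]
      refine ⟨G[lr], List.getElem_mem hlr_spec.1, ?_⟩
      rwa [List.getD_eq_getElem G[lr] "" hj]
    set lc := Nat.find hexc with hlc
    have hlc_spec : lc < M ∧ q lc = true := Nat.find_spec hexc
    have hlc_min : ∀ k, k < lc → k < M → q k = false := by
      intro k hk hkm
      have hnm := Nat.find_min hexc hk
      push_neg at hnm
      exact Bool.eq_false_iff.mpr (hnm hkm)
    set gc := Nat.findGreatest (fun j => j < M ∧ q j = true) M with hgc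
    have hgc_spec : gc < M ∧ q gc = true :=
      Nat.findGreatest_spec (P := fun j => j < M ∧ q j = true)
        (le_of_lt hlc_spec.1) ⟨hlc_spec.1, hlc_spec.2⟩
    have hgc_max : ∀ k, gc < k → k < M → q k = false := by
      intro k hk hkm
      have hng := Nat.findGreatest_is_greatest (P := fun j => j < M ∧ q j = true) hk (le_of_lt hkm)
      rw [Bool.eq_false_iff]
      intro hqk
      exact hng ⟨hkm, hqk⟩
    have hcolband : ∀ j, j < M → q j = true → lc ≤ j ∧ j ≤ gc := by
      intro j hj hqj
      constructor
      · exact Nat.find_le ⟨hj, hqj⟩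
      · by_contra hcon
        push_neg at hcon
        rw [hgc_max j hcon hj] at hqj
        exact Bool.false_ne_true hqj
    have hheadc : ((List.range M).filter q).head? = some lc :=
      pv_head_filter_range q M lc hlc_spec.1 hlc_spec.2 (fun k hk => hlc_min k hk (by omega))
    obtain ⟨tlc, htlc⟩ := List.head?_eq_some_iff.mp hheadc
    have hlastc : ((List.range M).filter q).getLast? = some gc :=
      pv_getLast_filter_range q M gc hgc_spec.1 hgc_spec.2 hgc_max
    rw [htlc]
    have hminc : PySem.List.pyGetD (lc :: tlc) 0 0 = lc := by
      rw [PySem.List.pyGetD_zero]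
      rfl
    have hmaxc : PySem.List.pyGetD (lc :: tlc) (-1) 0 = gc := by
      rw [PySem.List.pyGetD_neg_one (lc :: tlc) 0 (by simp)]
      rw [htlc] at hlastc
      rw [List.getLast?_eq_getLast (by simp)] at hlastc
      exact Option.some.inj hlastc
    rw [hmaxr, hminc, hmaxc]
    -- boolean bridges between A's scan predicates and B's row/column predicates
    have hq_cell : ∀ j, j < M → (q j = true ↔ ∃ i, ∃ hi : i < G.length, (G[i]'hi).getD j "" ≠ cw) := by
      intro j hj
      rw [hq]
      simp only []
      rw [List.any_eq_true]
      constructor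
      · intro ⟨r, hr, hrj⟩
        obtain ⟨i, hi, rfl⟩ := List.mem_iff_getElem.mp hr
        exact ⟨i, hi, by simpa [bne_iff_ne] using hrj⟩
      · intro ⟨i, hi, hij⟩
        exact ⟨G[i], List.getElem_mem hi, by simpa [bne_iff_ne] using hij⟩
    have hrowAll : ∀ k : Nat, k < G.length → pvRowAll G cw (k : Int) M = !(p k) := by
      intro k hk
      have hlk : G[k].length = M := hrowlen G[k] (List.getElem_mem hk)
      rcases Bool.eq_false_or_eq_true (p k) with hpk | hpk
      · rw [hpk]
        simp only [Bool.not_true]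
        rw [← Bool.not_eq_true, pvRowAll, List.all_eq_true]
        intro hcon
        rw [hp] at hpk
        simp only [] at hpk
        rw [List.getD_eq_getElem G [] hk, List.any_eq_true] at hpk
        obtain ⟨x, hx, hxne⟩ := hpk
        obtain ⟨j, hj, rfl⟩ := List.mem_iff_getElem.mp hx
        have := hcon j (List.mem_range.mpr (by omega))
        rw [pvCell_eval G k j hk hj] at this
        simp [bne_iff_ne] at hxne this
        exact hxne this
      · rw [hpk]
        simp only [Bool.not_false]
        rw [pvRowAll, List.all_eq_true]
        intro j hj
        rw [List.mem_range] at hj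
        rw [pvCell_eval G k j hk (by omega)]
        have := (hp_iff k hk).mp hpk G[k][j] (List.getElem_mem (by omega))
        simp [this]
    have hcolAll : ∀ j : Nat, j < M →
        pvColAll G cw (lr : Int) ((gr : Int) + 1) (j : Int) = !(q j) := by
      intro j hj
      rcases Bool.eq_false_or_eq_true (q j) with hqj | hqj
      · rw [hqj]
        simp only [Bool.not_true]
        rw [← Bool.not_eq_true, pvColAll, List.all_eq_true]
        intro hcon
        obtain ⟨i0, hi0, hne0⟩ := (hq_cell j hj).mp hqj
        have hli : G[i0].length = M := hrowlen G[i0] (List.getElem_mem hi0)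
        rw [List.getD_eq_getElem G[i0] "" (by omega)] at hne0
        have hpi0 : p i0 = true := by
          rw [hp]
          simp only []
          rw [List.getD_eq_getElem G [] hi0, List.any_eq_true]
          exact ⟨G[i0][j], List.getElem_mem (by omega), by simpa [bne_iff_ne] using hne0⟩
        have hbd := hband i0 hi0 hpi0
        have hmem : (i0 : Int) ∈ PySem.List.pyRange (lr : Int) ((gr : Int) + 1) 1 := by
          rw [PySem.List.mem_pyRange_one]
          omega
        have := hcon (i0 : Int) hmem
        rw [pvCell_eval G i0 j hi0 (by omega)] at this
        simp at this
        exact hne0 this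
      · rw [hqj]
        simp only [Bool.not_false]
        rw [pvColAll, List.all_eq_true]
        intro i hi
        rw [PySem.List.mem_pyRange_one] at hi
        have hi0 : 0 ≤ i := by omega
        set k := i.toNat with hk
        have hik : i = (k : Int) := by omega
        have hkn : k < G.length := by omega
        rw [hik, pvCell_eval G k j hkn (by rw [hrowlen G[k] (List.getElem_mem hkn)]; omega)]
        have hnone := (hq_cell j hj)
        have : ¬ ∃ i, ∃ hi : i < G.length, (G[i]'hi).getD j "" ≠ cw := by
          rw [← hnone]
          simp [hqj]
        push_neg at this
        have heq := this k hkn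
        rw [List.getD_eq_getElem G[k] "" (by rw [hrowlen G[k] (List.getElem_mem hkn)]; omega)] at heq
        simp [heq]
    -- the four directional searches
    have hn' : gridMap.length = G.length := by rw [hG]; simp
    rw [hn']
    have hxu : pvFindFwd (fun x => pvRowAll G cw x M) (G.length + 2) (-1) = (lr : Int) := by
      apply pvFindFwd_eq
      · rw [hrowAll lr hlr_spec.1, hlr_spec.2]; rfl
      · omega
      · omega
      · intro i h1 h2
        have hi0 : 0 ≤ i := by omega
        set k := i.toNat with hk
        have hik : i = (k : Int) := by omega
        have hkl : k < lr := by omega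
        rw [hik, hrowAll k (by omega), hlr_min k hkl (by omega)]
        rfl
    have hxd : pvFindBwd (fun x => pvRowAll G cw x M) (G.length + 2) ((G.length : Int) + 1)
        = (gr : Int) + 1 := by
      apply pvFindBwd_eq
      · rw [show ((gr : Int) + 1 - 1) = (gr : Int) by ring, hrowAll gr hgr_spec.1, hgr_spec.2]; rfl
      · omega
      · omega
      · intro i h1 h2
        have hi0 : 0 ≤ i - 1 := by omega
        set k := (i - 1).toNat with hk
        have hik : i - 1 = (k : Int) := by omega
        have hkb : gr < k ∧ k < G.length := by omega
        rw [hik, hrowAll k hkb.2, hgr_max k hkb.1 hkb.2]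
        rfl
    rw [hxu, hxd]
    have hyl : pvFindFwd (fun y => pvColAll G cw (lr : Int) ((gr : Int) + 1) y) (M + 2) (-1)
        = (lc : Int) := by
      apply pvFindFwd_eq
      · rw [hcolAll lc hlc_spec.1, hlc_spec.2]; rfl
      · omega
      · omega
      · intro i h1 h2
        have hi0 : 0 ≤ i := by omega
        set k := i.toNat with hk
        have hik : i = (k : Int) := by omega
        have hkl : k < lc := by omega
        rw [hik, hcolAll k (by omega), hlc_min k hkl (by omega)]
        rfl
    have hyr : pvFindBwd (fun y => pvColAll G cw (lr : Int) ((gr : Int) + 1) y) (M + 2)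
        ((M : Int) + 1) = (gc : Int) + 1 := by
      apply pvFindBwd_eq
      · rw [show ((gc : Int) + 1 - 1) = (gc : Int) by ring, hcolAll gc hgc_spec.1, hgc_spec.2]; rfl
      · omega
      · omega
      · intro i h1 h2
        have hi0 : 0 ≤ i - 1 := by omega
        set k := (i - 1).toNat with hk
        have hik : i - 1 = (k : Int) := by omega
        have hkb : gc < k ∧ k < M := by omega
        rw [hik, hcolAll k hkb.2, hgc_max k hkb.1 hkb.2]
        rfl
    rw [hyl, hyr]
    -- both results are the same window of the same grid
    have hc1 : ((gr : Int) + 1) = ((gr + 1 : Nat) : Int) := by push_cast; ring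
    have hc2 : ((gc : Int) + 1) = ((gc + 1 : Nat) : Int) := by push_cast; ring
    rw [hc1, hc2]
    simp only [PySem.List.slice_natCast]
    have hs1 : ((gr + 1 : Nat) : Int) = ((lr : Nat) : Int) + ((gr + 1 - lr : Nat) : Int) := by
      have := hlr_spec; have := hgr_spec
      have hle : lr ≤ gr := (hband lr hlr_spec.1 hlr_spec.2).2
      omega
    have hs2 : ((gc + 1 : Nat) : Int) = ((lc : Nat) : Int) + ((gc + 1 - lc : Nat) : Int) := by
      have hle : lc ≤ gc := (hcolband lc hlc_spec.1 hlc_spec.2).2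
      omega
    rw [hs1, hs2, pv_pyRange_natCast, pv_pyRange_natCast]
    rw [pv_drop_take_eq_map_range' ([] : List String) (gr + 1 - lr) lr G (by omega)]
    rw [List.map_map, List.map_map]
    apply List.map_congr_left
    intro i hi
    rw [List.mem_range'_1] at hi
    have hile : lr ≤ i ∧ i < gr + 1 := by omega
    have hiG : i < G.length := by omega
    have hlirow : (G.getD i []).length = M := by
      rw [List.getD_eq_getElem G [] hiG]
      exact hrowlen G[i] (List.getElem_mem hiG)
    simp only [Function.comp]
    rw [pv_drop_take_eq_map_range' ("" : String) (gc + 1 - lc) lc (G.getD i []) (by omega)]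
    rw [List.map_map]
    apply List.map_congr_left
    intro j hj
    simp only [Function.comp]
    rw [List.mem_range'_1] at hj
    have hjM : j < M := by omega
    rw [Int.ofNat_eq_natCast, Int.ofNat_eq_natCast]
    rw [pvCell_eval G i j hiG (by rw [hrowlen G[i] (List.getElem_mem hiG)]; omega)]
    rw [List.getD_eq_getElem G [] hiG, List.getD_eq_getElem G[i] "" (by rw [hrowlen G[i] (List.getElem_mem hiG)]; omega)]
    rfl

-- ===== VERDICT (by name: the statement is the Claim_ definition above) =====
theorem getBoundingBoxSub_spec : Claim_equal_getBoundingBoxSub := by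
  intro gridMap charWhite _ hpre
  unfold Spec_getBoundingBoxSub
  exact pv_main gridMap charWhite hpre
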